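-- pv_equiv track=rewrite | github.com/xiaoxiyouran/blogger | packages/process_highlight.py | delInCode
-- ===== SOURCE A (Python) =====
-- import  copy
--
-- def delInCode(findList,findListPreCode,findListPostCode):
--     '''
--     需要把代码域内的 == 排除掉
--     :param findList:
--     :param findListPreCode:
--     :param findListPostCode:
--     :return:
--     '''
--     # print findList
--     # print findListPreCode
--     # print findListPostCode
--
--     # process_list = findList
--     while len(findListPreCode) > 0 and len(findListPostCode) >0 :
--         first = findListPreCode.pop(0)
--         second = findListPostCode.pop(0)
--         pop_index = []
--         for i in range(len(findList)):
--             if findList[i] >= first and second >= findList[i]: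
--                 pop_index.append(i)
--         newFindList = []
--         for i in range(len(findList)):
--             if i not in pop_index:
--                 newFindList.append(findList[i])
--
--         findList = copy.deepcopy(newFindList)
--
--
--     return findList
-- ===== SOURCE B (Python) =====
-- def delInCode(findList, findListPreCode, findListPostCode):
--     intervals = list(zip(findListPreCode, findListPostCode))
--     return [x for x in findList if not any(a <= x <= b for a, b in intervals)]
-- ===== Notes on version B (the rewrite author's own statement) =====
-- stated objective: faster
-- what changed: Replaces A's per-interval passes (index list, linear 'i not in pop_index' scan, deepcopy each round) with one filtering pass over findList testing coverage by the zipped interval list; B does not mutate the interval lists where A pops them empty.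
import Mathlib
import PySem

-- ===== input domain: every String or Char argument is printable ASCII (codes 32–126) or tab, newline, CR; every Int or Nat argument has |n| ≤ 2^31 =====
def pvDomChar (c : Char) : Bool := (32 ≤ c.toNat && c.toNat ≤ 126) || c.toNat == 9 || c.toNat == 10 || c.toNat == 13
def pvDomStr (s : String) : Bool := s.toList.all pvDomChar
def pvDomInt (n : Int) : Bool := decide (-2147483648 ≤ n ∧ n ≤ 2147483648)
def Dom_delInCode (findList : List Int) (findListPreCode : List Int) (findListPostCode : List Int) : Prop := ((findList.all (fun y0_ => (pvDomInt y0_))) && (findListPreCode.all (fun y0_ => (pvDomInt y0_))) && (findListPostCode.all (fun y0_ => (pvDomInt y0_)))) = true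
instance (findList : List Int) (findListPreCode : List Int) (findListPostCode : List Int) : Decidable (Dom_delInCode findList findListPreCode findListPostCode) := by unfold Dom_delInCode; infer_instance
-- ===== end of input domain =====

-- B replaces A's per-interval passes (pop_index list, linear membership scan, list rebuild
-- per interval) with a single filtering pass testing coverage by the zipped interval list.
-- Equivalence is about the RETURN value only: A pops findListPreCode/findListPostCode empty
-- (observable mutation); B leaves both untouched.

-- ===== PORT A =====
-- while loop of A: each round pops one (first, second) pair, collects pop_index,
-- rebuilds findList without those positions.
def delInCodeGo (findList : List Int) (findListPreCode : List Int) (findListPostCode : List Int) : List Int :=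
  match findListPreCode, findListPostCode with
  | first :: preRest, second :: postRest =>
    let popIndex : List Nat :=
      (List.range findList.length).foldl
        (fun acc i => if findList.getD i 0 ≥ first ∧ second ≥ findList.getD i 0 then acc ++ [i] else acc) []
    let newFindList : List Int :=
      (List.range findList.length).foldl
        (fun acc i => if i ∉ popIndex then acc ++ [findList.getD i 0] else acc) []
    delInCodeGo newFindList preRest postRest
  | _, _ => findList

def delInCode (findList : List Int) (findListPreCode : List Int) (findListPostCode : List Int) : List Int :=
  delInCodeGo findList findListPreCode findListPostCode

-- ===== PORT B =====
def delInCode_alt (findList : List Int) (findListPreCode : List Int) (findListPostCode : List Int) : List Int :=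
  let intervals := findListPreCode.zip findListPostCode
  findList.filter (fun x => ! intervals.any (fun p => decide (p.1 ≤ x) && decide (x ≤ p.2)))

-- ===== PRECONDITION & SPEC =====
def Spec_delInCode (findList : List Int) (findListPreCode : List Int) (findListPostCode : List Int) (out : List Int) : Prop := out = delInCode_alt findList findListPreCode findListPostCode
instance (findList : List Int) (findListPreCode : List Int) (findListPostCode : List Int) (out : List Int) : Decidable (Spec_delInCode findList findListPreCode findListPostCode out) := by unfold Spec_delInCode; infer_instance

-- ===== CLAIM (what is proved, stated in full; the proofs are below) =====
def Claim_equal_delInCode : Prop := ∀ (findList : List Int) (findListPreCode : List Int) (findListPostCode : List Int), Dom_delInCode findList findListPreCode findListPostCode → Spec_delInCode findList findListPreCode findListPostCode (delInCode findList findListPreCode findListPostCode)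

-- ===== LEMMAS AND PROOFS =====

-- conditional append-map loop shape
theorem foldl_append_if_map {α β : Type} (q : α → Prop) [DecidablePred q] (g : α → β) (xs : List α) (acc : List β) :
    xs.foldl (fun acc x => if q x then acc ++ [g x] else acc) acc = acc ++ (xs.filter (fun x => decide (q x))).map g := by
  induction xs generalizing acc with
  | nil => simp
  | cons x xs ih =>
    simp only [List.foldl_cons, List.filter_cons]
    by_cases h : q x <;> simp [h, ih, List.append_assoc]

-- selecting positions of a list by a predicate on the stored value is filter
theorem range_filter_map_getD (p : Int → Bool) (fl : List Int) :
    ((List.range fl.length).filter (fun i => p (fl.getD i 0))).map (fun i => fl.getD i 0)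
      = fl.filter p := by
  induction fl with
  | nil => simp
  | cons x xs ih =>
    rw [List.length_cons, List.range_succ_eq_map]
    simp only [List.filter_cons, List.getD_cons_zero, List.filter_map]
    by_cases h : p x <;>
      simpa [h, Function.comp_def, List.filter_cons, List.filter_map, List.map_map] using ih

-- one round of A's while loop is one filter
theorem delInCodeGo_step (fl : List Int) (first second : Int) (preRest postRest : List Int) :
    delInCodeGo fl (first :: preRest) (second :: postRest)
      = delInCodeGo (fl.filter (fun x => ! (decide (first ≤ x) && decide (x ≤ second)))) preRest postRest := by
  rw [delInCodeGo]
  congr 1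
  rw [foldl_append_if_map, List.nil_append]
  rw [List.filter_congr (l := List.range fl.length)
      (q := fun i => ! (decide (first ≤ fl.getD i 0) && decide (fl.getD i 0 ≤ second)))
      (by intro i hi
          simp [foldl_append_if_map, List.mem_filter, hi, ge_iff_le, ← decide_not, not_le])]
  exact range_filter_map_getD (fun x => ! (decide (first ≤ x) && decide (x ≤ second))) fl

-- A's loop computes B's single filter
theorem delInCodeGo_eq_filter (pre : List Int) :
    ∀ (post fl : List Int),
      delInCodeGo fl pre post
        = fl.filter (fun x => ! (pre.zip post).any (fun p => decide (p.1 ≤ x) && decide (x ≤ p.2))) := by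
  induction pre with
  | nil => intro post fl; cases post <;> simp [delInCodeGo]
  | cons first preRest ih =>
    intro post fl
    cases post with
    | nil => simp [delInCodeGo]
    | cons second postRest =>
      rw [delInCodeGo_step, ih]
      rw [List.filter_filter]
      apply List.filter_congr
      intro x _
      simp [Bool.and_comm]

-- ===== VERDICT (by name: the statement is the Claim_ definition above) =====
theorem delInCode_spec : Claim_equal_delInCode := by
  intro fl pre post _
  show delInCode fl pre post = delInCode_alt fl pre post
  simpa [delInCode_alt] using delInCodeGo_eq_filter pre post fl
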